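-- pv_equiv track=rewrite | github.com/GunjanAS/Probablistic-Sensing | agent8.py | get_closest_cells
-- ===== SOURCE A (Python) =====
-- def get_closest_cells(curr_cell, listOfCoordinates):
--     min_dist = float('inf')
--     closest_cell_loc = []
--     for cord in listOfCoordinates:
--         dist = abs(cord[0]-curr_cell[0])+abs(cord[1]-curr_cell[1])
--         if dist <= min_dist:
--             min_dist = dist
--             closest_cell_loc.append(cord)
--     finalclosest_cell_loc = []
--     for cellpos in closest_cell_loc:
--         if abs(cellpos[0]-curr_cell[0])+abs(cellpos[1]-curr_cell[1]) == min_dist: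
--             finalclosest_cell_loc.append(cellpos)
--     return finalclosest_cell_loc
-- ===== SOURCE B (Python) =====
-- def get_closest_cells(curr_cell, listOfCoordinates):
--     if not listOfCoordinates:
--         return []
--     m = min(abs(x - curr_cell[0]) + abs(y - curr_cell[1])
--             for (x, y) in listOfCoordinates)
--     return [c for c in listOfCoordinates
--             if abs(c[0] - curr_cell[0]) + abs(c[1] - curr_cell[1]) == m]
-- ===== Notes on version B (the rewrite author's own statement) =====
-- stated objective: simpler
-- what changed: B computes the minimum Manhattan distance with a single min() reduction and then returns one comprehension filter, instead of A's stateful over-collecting loop (append while dist <= running min) followed by a refiltering second loop over the collected list.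
import Mathlib
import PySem

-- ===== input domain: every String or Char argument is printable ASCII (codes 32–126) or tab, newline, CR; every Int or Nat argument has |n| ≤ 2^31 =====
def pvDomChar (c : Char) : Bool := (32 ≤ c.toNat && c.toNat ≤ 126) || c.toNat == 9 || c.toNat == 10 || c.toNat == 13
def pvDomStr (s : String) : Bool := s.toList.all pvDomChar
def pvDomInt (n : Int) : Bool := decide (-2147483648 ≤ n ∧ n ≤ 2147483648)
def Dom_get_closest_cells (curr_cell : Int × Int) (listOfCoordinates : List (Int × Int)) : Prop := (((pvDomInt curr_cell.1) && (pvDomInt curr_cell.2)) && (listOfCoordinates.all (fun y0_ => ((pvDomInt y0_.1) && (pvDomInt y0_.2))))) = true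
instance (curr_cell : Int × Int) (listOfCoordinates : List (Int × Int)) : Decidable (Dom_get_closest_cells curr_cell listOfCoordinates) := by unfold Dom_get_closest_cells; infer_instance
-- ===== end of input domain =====

-- B replaces A's over-collecting stateful loop plus refiltering second loop by a plain
-- min() reduction over the distances followed by one filter; simpler, same cost.

-- Manhattan distance used by both programs
def pvDist (curr_cell cord : Int × Int) : Int :=
  |cord.1 - curr_cell.1| + |cord.2 - curr_cell.2|

-- ===== PORT A =====
-- first loop of A: over-collect while tracking the running minimum (dist <= min_dist);
-- min_dist : Option Int with none = float('inf')
def pvLoopA (curr_cell : Int × Int) (st : Option Int × List (Int × Int))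
    (l : List (Int × Int)) : Option Int × List (Int × Int) :=
  l.foldl (fun st cord =>
    let d := pvDist curr_cell cord
    if (match st.1 with | none => true | some y => decide (d ≤ y)) = true
    then (some d, st.2 ++ [cord]) else st) st

def get_closest_cells (curr_cell : Int × Int) (listOfCoordinates : List (Int × Int)) : List (Int × Int) :=
  let s := pvLoopA curr_cell (none, []) listOfCoordinates
  -- second loop of A: keep cells whose distance equals the final min_dist
  s.2.foldl (fun acc cellpos =>
    if some (pvDist curr_cell cellpos) = s.1 then acc ++ [cellpos] else acc) []

-- ===== PORT B =====
-- Source B: guard for the empty list, min() over the distances, one comprehension filter.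
-- min over the nonempty list of distances is List.min? (none exactly when the list is empty).
def get_closest_cells_alt (curr_cell : Int × Int) (listOfCoordinates : List (Int × Int)) : List (Int × Int) :=
  match (listOfCoordinates.map (fun c => pvDist curr_cell c)).min? with
  | none => []
  | some m => listOfCoordinates.filter (fun c => pvDist curr_cell c = m)

-- ===== PRECONDITION & SPEC =====
def Spec_get_closest_cells (curr_cell : Int × Int) (listOfCoordinates : List (Int × Int)) (out : List (Int × Int)) : Prop := out = get_closest_cells_alt curr_cell listOfCoordinates
instance (curr_cell : Int × Int) (listOfCoordinates : List (Int × Int)) (out : List (Int × Int)) : Decidable (Spec_get_closest_cells curr_cell listOfCoordinates out) := by unfold Spec_get_closest_cells; infer_instance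

-- ===== CLAIM (what is proved, stated in full; the proofs are below) =====
def Claim_equal_get_closest_cells : Prop := ∀ (curr_cell : Int × Int) (listOfCoordinates : List (Int × Int)), Dom_get_closest_cells curr_cell listOfCoordinates → Spec_get_closest_cells curr_cell listOfCoordinates (get_closest_cells curr_cell listOfCoordinates)

-- ===== LEMMAS AND PROOFS =====

-- A's second loop is a filter
theorem foldl_filter_append (p : (Int × Int) → Prop) [DecidablePred p] (l acc : List (Int × Int)) :
    l.foldl (fun acc c => if p c then acc ++ [c] else acc) acc
      = acc ++ l.filter (fun c => decide (p c)) := by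
  induction l generalizing acc with
  | nil => simp
  | cons x xs ih =>
    simp only [List.foldl_cons, List.filter_cons]
    by_cases h : p x <;> simp [h, ih]

theorem foldl_min_le_init (m : Int) (ds : List Int) : List.foldl min m ds ≤ m := by
  induction ds generalizing m with
  | nil => simp
  | cons d ds ih =>
    simp only [List.foldl_cons]
    exact le_trans (ih (min m d)) (min_le_left m d)

theorem foldl_min_le_mem (x : Int) (ds : List Int) :
    ∀ m : Int, x ∈ ds → List.foldl min m ds ≤ x := by
  induction ds with
  | nil => intro m hx; cases hx
  | cons d ds ih =>
    intro m hx
    simp only [List.foldl_cons]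
    rcases List.mem_cons.1 hx with h | h
    · subst h
      exact le_trans (foldl_min_le_init _ _) (min_le_right m x)
    · exact ih (min m d) h

-- invariant of A's first loop after the first element: the running minimum equals the
-- fold of min over the remaining distances, and filtering the over-collected list at any
-- value k bounded by all those distances behaves like filtering the raw list.
theorem invA (curr : Int × Int) (l : List (Int × Int)) :
    ∀ (m : Int) (acc : List (Int × Int)) (k : Int),
    k ≤ m → (∀ x ∈ l, k ≤ pvDist curr x) →
    (pvLoopA curr (some m, acc) l).1 = some (List.foldl min m (l.map (pvDist curr))) ∧
    (pvLoopA curr (some m, acc) l).2.filter (fun x => pvDist curr x = k)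
      = acc.filter (fun x => pvDist curr x = k) ++ l.filter (fun x => pvDist curr x = k) := by
  induction l with
  | nil =>
    intro m acc k _ _
    simp [pvLoopA]
  | cons c cs ih =>
    intro m acc k hkm hkl
    have hkc : k ≤ pvDist curr c := hkl c (List.mem_cons_self)
    simp only [pvLoopA, List.foldl_cons, List.map_cons] at *
    by_cases hle : pvDist curr c ≤ m
    · have hd : (decide (pvDist curr c ≤ m)) = true := by simpa using hle
      simp only [hd]
      rw [if_pos trivial]
      have hmin : min m (pvDist curr c) = pvDist curr c := min_eq_right hle
      have h := ih (pvDist curr c) (acc ++ [c]) k hkc (fun x hx => hkl x (List.mem_cons_of_mem _ hx))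
      rw [hmin]
      refine ⟨h.1, ?_⟩
      rw [h.2, List.filter_append, List.filter_cons]
      by_cases hk : pvDist curr c = k <;> simp [hk]
    · have hd : (decide (pvDist curr c ≤ m)) = false := by simpa using hle
      simp only [hd, Bool.false_eq_true, if_false]
      have hmin : min m (pvDist curr c) = m := min_eq_left (by omega)
      have h := ih m acc k hkm (fun x hx => hkl x (List.mem_cons_of_mem _ hx))
      rw [hmin]
      refine ⟨h.1, ?_⟩
      rw [h.2, List.filter_cons]
      have hk : ¬ (pvDist curr c = k) := by omega
      simp [hk]

-- ===== VERDICT (by name: the statement is the Claim_ definition above) =====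
theorem get_closest_cells_spec : Claim_equal_get_closest_cells := by
  intro curr l _
  unfold Spec_get_closest_cells get_closest_cells get_closest_cells_alt
  cases l with
  | nil => rfl
  | cons c cs =>
    -- A's first loop: first step taken via the none-branch, then invA
    have hstep : pvLoopA curr (none, []) (c :: cs)
        = pvLoopA curr (some (pvDist curr c), [c]) cs := by
      simp [pvLoopA]
    set M := List.foldl min (pvDist curr c) (cs.map (pvDist curr)) with hM
    have hMc : M ≤ pvDist curr c := foldl_min_le_init _ _
    have hMcs : ∀ x ∈ cs, M ≤ pvDist curr x := fun x hx =>
      foldl_min_le_mem _ _ _ (List.mem_map_of_mem hx)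
    have h := invA curr cs (pvDist curr c) [c] M hMc hMcs
    -- B's min? on the nonempty mapped list
    have hmin? : ((c :: cs).map (fun x => pvDist curr x)).min? = some M := by
      simp only [List.map_cons, List.min?_cons', hM]
    simp only [hmin?]
    rw [hstep]
    rw [foldl_filter_append (fun x => some (pvDist curr x) = (pvLoopA curr (some (pvDist curr c), [c]) cs).1)]
    have hpred : (fun x => decide (some (pvDist curr x) = (pvLoopA curr (some (pvDist curr c), [c]) cs).1))
        = (fun x => decide (pvDist curr x = M)) := by
      funext x; rw [h.1]; simp [hM]
    rw [List.nil_append, hpred, h.2]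
    rw [List.filter_cons]
    by_cases hk : pvDist curr c = M <;> simp [hk]
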